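-- pv_equiv track=rewrite | github.com/NirajanKhadka/JobQst | src/analysis/hybrid_processor.py | _merge_benefits
-- ===== SOURCE A (Python) =====
-- from typing import Dict, List, Optional, Any, Tuple
--
-- def _merge_benefits(custom_benefits: List[str], llm_benefits: List[str]) -> List[str]:
--     """
--     Merge benefits from custom logic and LLM analysis.
--
--     Args:
--         custom_benefits: Benefits extracted by custom logic
--         llm_benefits: Benefits identified by LLM
--
--     Returns:
--         Merged and deduplicated benefits list
--     """
--     all_benefits = set()
--
--     # Add custom benefits (these are more reliable for standard benefits)
--     for benefit in custom_benefits: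
--         all_benefits.add(benefit.strip().title())
--
--     # Add LLM benefits
--     for benefit in llm_benefits:
--         benefit = benefit.strip().title()
--         # Check for duplicates case-insensitively
--         if not any(existing.lower() == benefit.lower() for existing in all_benefits):
--             all_benefits.add(benefit)
--
--     return sorted(list(all_benefits))[:10]  # Limit to top 10 benefits
-- ===== SOURCE B (Python) =====
-- from typing import List
--
-- def _merge_benefits(custom_benefits: List[str], llm_benefits: List[str]) -> List[str]:
--     merged = sorted(b.strip().title() for b in custom_benefits + llm_benefits)
--     out = []
--     prev = None
--     for b in merged:
--         if b != prev:
--             out.append(b)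
--             prev = b
--     return out[:10]
-- ===== Notes on version B (the rewrite author's own statement) =====
-- stated objective: faster
-- what changed: Replaces A's incremental set with a case-insensitive any() scan over the whole set per LLM item by one normalize-everything pass, a single sort, and an adjacent-duplicate scan (title-casing makes the case-insensitive check redundant).
import Mathlib
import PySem

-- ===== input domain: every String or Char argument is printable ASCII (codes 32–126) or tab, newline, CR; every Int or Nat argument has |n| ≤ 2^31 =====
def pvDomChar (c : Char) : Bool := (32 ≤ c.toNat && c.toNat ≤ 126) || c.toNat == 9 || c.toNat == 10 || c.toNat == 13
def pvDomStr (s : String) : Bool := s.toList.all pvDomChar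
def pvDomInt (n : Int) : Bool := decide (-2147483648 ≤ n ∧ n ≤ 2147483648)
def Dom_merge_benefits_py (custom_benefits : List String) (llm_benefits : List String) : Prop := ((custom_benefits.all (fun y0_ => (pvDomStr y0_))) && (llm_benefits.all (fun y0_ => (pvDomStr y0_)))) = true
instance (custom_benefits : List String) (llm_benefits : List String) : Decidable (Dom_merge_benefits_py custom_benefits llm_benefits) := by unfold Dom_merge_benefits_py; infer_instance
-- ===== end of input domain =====

-- B replaces A's incremental set with a per-item case-insensitive any() scan by one
-- normalize-all pass, a single sort, and an adjacent-duplicate scan (objective: faster,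
-- O(n log n) vs A's quadratic per-item any() scan; measured faster in a timing run).

-- ===== PORT A =====
-- str.title() has no PySem primitive: ported by hand, character for character; exact on ASCII
-- (a letter is uppercased after a non-letter, lowercased after a letter; both ports use it).
def pvTitleChars : List Char → Bool → List Char
  | [], _ => []
  | c :: rest, prevCased =>
    if PySem.Chars.isalpha c then
      (if prevCased then PySem.Chars.lowerChar c else PySem.Chars.upperChar c) :: pvTitleChars rest true
    else
      c :: pvTitleChars rest false

def pvTitle (s : String) : String := String.ofList (pvTitleChars s.toList false)

def merge_benefits_py (custom_benefits : List String) (llm_benefits : List String) : List String :=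
  let all1 : PySem.Set String := custom_benefits.foldl
    (fun s benefit => PySem.Set.add s (pvTitle (PySem.Str.strip benefit))) PySem.Set.empty
  let all2 : PySem.Set String := llm_benefits.foldl
    (fun s benefit =>
      let b := pvTitle (PySem.Str.strip benefit)
      if s.any (fun existing => PySem.Str.lower existing == PySem.Str.lower b) then s
      else PySem.Set.add s b) all1
  (PySem.List.sorted all2 (fun x => x)).take 10

-- ===== PORT B =====
def merge_benefits_py_alt (custom_benefits : List String) (llm_benefits : List String) : List String :=
  let merged := PySem.List.sorted ((custom_benefits ++ llm_benefits).map
      (fun b => pvTitle (PySem.Str.strip b))) (fun x => x)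
  let res := merged.foldl
    (fun (acc : List String × Option String) b =>
      if some b ≠ acc.2 then (acc.1 ++ [b], some b) else acc) ([], none)
  res.1.take 10


-- ===== PRECONDITION & SPEC =====
def Spec_merge_benefits_py (custom_benefits : List String) (llm_benefits : List String) (out : List String) : Prop := out = merge_benefits_py_alt custom_benefits llm_benefits
instance (custom_benefits : List String) (llm_benefits : List String) (out : List String) : Decidable (Spec_merge_benefits_py custom_benefits llm_benefits out) := by unfold Spec_merge_benefits_py; infer_instance

-- ===== CLAIM =====
def Claim_equal_merge_benefits_py : Prop := ∀ (custom_benefits : List String) (llm_benefits : List String), Dom_merge_benefits_py custom_benefits llm_benefits → Spec_merge_benefits_py custom_benefits llm_benefits (merge_benefits_py custom_benefits llm_benefits)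

-- ===== LEMMAS AND PROOFS =====
theorem pvChar_le_iff (a c : Char) : (a ≤ c) ↔ a.toNat ≤ c.toNat := by
  rw [Char.le_def]; exact UInt32.le_iff_toNat_le

theorem pvChar_eq_of_toNat {c1 c2 : Char} (h : c1.toNat = c2.toNat) : c1 = c2 := by
  apply Char.ext; exact UInt32.toNat_inj.mp h

theorem pvOfNat_toNat {n : Nat} (h : n < 55296) : (Char.ofNat n).toNat = n := by
  rw [Char.toNat_ofNat]; simp [Nat.isValidChar, h]

theorem pvIsupper_iff (c : Char) : PySem.Chars.isupper c = true ↔ 65 ≤ c.toNat ∧ c.toNat ≤ 90 := by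
  simp [PySem.Chars.isupper, pvChar_le_iff]

theorem pvIslower_iff (c : Char) : PySem.Chars.islower c = true ↔ 97 ≤ c.toNat ∧ c.toNat ≤ 122 := by
  simp [PySem.Chars.islower, pvChar_le_iff]

theorem pvToNat_lower_upper (c : Char) (h : PySem.Chars.isupper c = true) :
    (PySem.Chars.lowerChar c).toNat = c.toNat + 32 := by
  have hb := (pvIsupper_iff c).mp h
  simp only [PySem.Chars.lowerChar, h, if_true]
  exact pvOfNat_toNat (by omega)

theorem pvLowerChar_of_not_upper (c : Char) (h : ¬ PySem.Chars.isupper c = true) :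
    PySem.Chars.lowerChar c = c := by
  simp [PySem.Chars.lowerChar, h]

theorem pvLower_faithful (c1 c2 : Char)
    (h : PySem.Chars.lowerChar c1 = PySem.Chars.lowerChar c2) :
    PySem.Chars.upperChar c1 = PySem.Chars.upperChar c2 ∧
    PySem.Chars.isalpha c1 = PySem.Chars.isalpha c2 := by
  by_cases h1 : PySem.Chars.isupper c1 = true <;> by_cases h2 : PySem.Chars.isupper c2 = true
  · -- both upper: c1 = c2
    have e : c1 = c2 := by
      apply pvChar_eq_of_toNat
      have := pvToNat_lower_upper c1 h1; have := pvToNat_lower_upper c2 h2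
      have : (PySem.Chars.lowerChar c1).toNat = (PySem.Chars.lowerChar c2).toNat := by rw [h]
      omega
    rw [e]; exact ⟨rfl, rfl⟩
  · -- c1 upper, c2 not: lowerChar c1 = c2, c2 lower
    rw [pvLowerChar_of_not_upper c2 h2] at h
    have ht : c2.toNat = c1.toNat + 32 := by rw [← h]; exact pvToNat_lower_upper c1 h1
    have hb1 := (pvIsupper_iff c1).mp h1
    have hl2 : PySem.Chars.islower c2 = true := by rw [pvIslower_iff]; omega
    have hl1 : PySem.Chars.islower c1 = false := by
      rw [Bool.eq_false_iff]; intro hc; rw [pvIslower_iff] at hc; omega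
    constructor
    · simp [PySem.Chars.upperChar, hl1, hl2]
      symm; apply pvChar_eq_of_toNat; rw [pvOfNat_toNat (by omega)]; omega
    · simp [PySem.Chars.isalpha, h1, h2, hl1, hl2]
  · -- symmetric
    rw [pvLowerChar_of_not_upper c1 h1] at h
    have ht : c1.toNat = c2.toNat + 32 := by rw [h]; exact pvToNat_lower_upper c2 h2
    have hb2 := (pvIsupper_iff c2).mp h2
    have hl1 : PySem.Chars.islower c1 = true := by rw [pvIslower_iff]; omega
    have hl2 : PySem.Chars.islower c2 = false := by
      rw [Bool.eq_false_iff]; intro hc; rw [pvIslower_iff] at hc; omega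
    constructor
    · simp [PySem.Chars.upperChar, hl1, hl2]
      apply pvChar_eq_of_toNat; rw [pvOfNat_toNat (by omega)]; omega
    · simp [PySem.Chars.isalpha, h1, h2, hl1, hl2]
  · rw [pvLowerChar_of_not_upper c1 h1, pvLowerChar_of_not_upper c2 h2] at h
    rw [h]; exact ⟨rfl, rfl⟩

theorem pvLowerChar_eq_of_not_alpha (c : Char) (h : ¬ PySem.Chars.isalpha c = true) :
    PySem.Chars.lowerChar c = c := by
  apply pvLowerChar_of_not_upper
  simp [PySem.Chars.isalpha] at h; simp [h.1]

theorem pvLowerChar_upperChar (c : Char) :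
    PySem.Chars.lowerChar (PySem.Chars.upperChar c) = PySem.Chars.lowerChar c := by
  by_cases hl : PySem.Chars.islower c = true
  · have hb := (pvIslower_iff c).mp hl
    have hu : PySem.Chars.upperChar c = Char.ofNat (c.toNat - 32) := by
      simp [PySem.Chars.upperChar, hl]
    have htn : (PySem.Chars.upperChar c).toNat = c.toNat - 32 := by
      rw [hu]; exact pvOfNat_toNat (by omega)
    have hup : PySem.Chars.isupper (PySem.Chars.upperChar c) = true := by
      rw [pvIsupper_iff]; omega
    have hnotup : ¬ PySem.Chars.isupper c = true := by
      rw [pvIsupper_iff]; omega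
    rw [pvLowerChar_of_not_upper c hnotup]
    apply pvChar_eq_of_toNat
    rw [pvToNat_lower_upper _ hup]; omega
  · simp [PySem.Chars.upperChar, hl]

theorem pvLowerChar_lowerChar (c : Char) :
    PySem.Chars.lowerChar (PySem.Chars.lowerChar c) = PySem.Chars.lowerChar c := by
  by_cases hu : PySem.Chars.isupper c = true
  · have hb := (pvIsupper_iff c).mp hu
    have htn := pvToNat_lower_upper c hu
    apply pvLowerChar_of_not_upper
    rw [pvIsupper_iff]; omega
  · conv_lhs => rw [pvLowerChar_of_not_upper c hu]

def pvNorm (b : String) : String := pvTitle (PySem.Str.strip b)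

theorem pvLower_titleChars (cs : List Char) (p : Bool) :
    PySem.Chars.lower (pvTitleChars cs p) = PySem.Chars.lower cs := by
  induction cs generalizing p with
  | nil => rfl
  | cons c rest ih =>
    by_cases ha : PySem.Chars.isalpha c = true
    · by_cases hp : p = true <;>
        simp [pvTitleChars, ha, hp, PySem.Chars.lower, pvLowerChar_upperChar,
          pvLowerChar_lowerChar] <;>
        simpa [PySem.Chars.lower] using ih true
    · simp only [pvTitleChars, if_neg ha, PySem.Chars.lower, List.map_cons]
      simpa [PySem.Chars.lower] using ih false

theorem pvTitleChars_congr (u : List Char) : ∀ (v : List Char) (p : Bool),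
    PySem.Chars.lower u = PySem.Chars.lower v → pvTitleChars u p = pvTitleChars v p := by
  induction u with
  | nil => intro v p h; cases v with
    | nil => rfl
    | cons c cs => simp [PySem.Chars.lower] at h
  | cons c rest ih =>
    intro v p h
    cases v with
    | nil => simp [PySem.Chars.lower] at h
    | cons d ds =>
      simp only [PySem.Chars.lower, List.map_cons, List.cons.injEq] at h
      obtain ⟨hc, hrest⟩ := h
      obtain ⟨hupper, halpha⟩ := pvLower_faithful c d hc
      by_cases ha : PySem.Chars.isalpha c = true
      · have hd : PySem.Chars.isalpha d = true := by rw [← halpha]; exact ha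
        have hlc : PySem.Chars.lowerChar c = PySem.Chars.lowerChar d := hc
        by_cases hp : p = true <;>
          simp [pvTitleChars, ha, hd, hp, hupper, hlc,
            ih ds true (by simpa [PySem.Chars.lower] using hrest)]
      · have hd : ¬ PySem.Chars.isalpha d = true := by rw [← halpha]; exact ha
        have hcd : c = d := by
          rw [← pvLowerChar_eq_of_not_alpha c ha, ← pvLowerChar_eq_of_not_alpha d hd, hc]
        simp [pvTitleChars, if_neg hd, hcd,
          ih ds false (by simpa [PySem.Chars.lower] using hrest)]

theorem pvNorm_faithful (a b : String)
    (h : PySem.Str.lower (pvNorm a) = PySem.Str.lower (pvNorm b)) : pvNorm a = pvNorm b := by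
  have h' : (PySem.Str.lower (pvNorm a)).toList = (PySem.Str.lower (pvNorm b)).toList := by rw [h]
  simp only [PySem.Str.toList_lower, pvNorm, pvTitle, String.toList_ofList] at h'
  rw [pvLower_titleChars, pvLower_titleChars] at h'
  apply String.toList_inj.mp
  simp only [pvNorm, pvTitle, String.toList_ofList]
  exact pvTitleChars_congr _ _ false h'

theorem pvAny_eq_contains (s : PySem.Set String) (hs : ∀ x ∈ s, ∃ a, x = pvNorm a)
    (b : String) (hb : ∃ a, b = pvNorm a) :
    s.any (fun ex => PySem.Str.lower ex == PySem.Str.lower b) = PySem.Set.contains s b := by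
  rw [Bool.eq_iff_iff]
  simp only [List.any_eq_true, beq_iff_eq, PySem.Set.contains, List.contains_iff_mem]
  constructor
  · rintro ⟨x, hx, hlx⟩
    obtain ⟨a1, rfl⟩ := hs x hx
    obtain ⟨a2, rfl⟩ := hb
    rwa [pvNorm_faithful _ _ hlx] at hx
  · intro h; exact ⟨b, h, rfl⟩

theorem pvStep_eq_add (s : PySem.Set String) (hs : ∀ x ∈ s, ∃ a, x = pvNorm a) (benefit : String) :
    (if s.any (fun ex => PySem.Str.lower ex == PySem.Str.lower (pvNorm benefit)) then s
     else PySem.Set.add s (pvNorm benefit)) = PySem.Set.add s (pvNorm benefit) := by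
  rw [pvAny_eq_contains s hs _ ⟨benefit, rfl⟩]
  by_cases hc : PySem.Set.contains s (pvNorm benefit) = true <;>
    simp [PySem.Set.add]

theorem pvMem_add {s : PySem.Set String} {x y : String} (h : x ∈ PySem.Set.add s y) :
    x = y ∨ x ∈ s := by
  by_cases hc : y ∈ s <;> simp [PySem.Set.add, PySem.Set.contains, hc] at h <;> tauto

theorem pvLlmFold (l : List String) : ∀ (s : PySem.Set String), (∀ x ∈ s, ∃ a, x = pvNorm a) →
    l.foldl (fun s benefit =>
      if s.any (fun ex => PySem.Str.lower ex == PySem.Str.lower (pvNorm benefit)) then s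
      else PySem.Set.add s (pvNorm benefit)) s
    = (l.map pvNorm).foldl PySem.Set.add s := by
  induction l with
  | nil => intro s _; rfl
  | cons b rest ih =>
    intro s hs
    simp only [List.foldl_cons, List.map_cons, pvStep_eq_add s hs b]
    apply ih
    intro x hx
    rcases pvMem_add hx with h | h
    · exact ⟨b, h⟩
    · exact hs x h

def pvDedupAdj : Option String → List String → List String
  | _, [] => []
  | p, b :: rest => if some b ≠ p then b :: pvDedupAdj (some b) rest else pvDedupAdj p rest

theorem pvBFold (l : List String) : ∀ (acc : List String) (p : Option String),
    (l.foldl (fun (acc : List String × Option String) b =>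
        if some b ≠ acc.2 then (acc.1 ++ [b], some b) else acc) (acc, p)).1
    = acc ++ pvDedupAdj p l := by
  induction l with
  | nil => intro acc p; simp [pvDedupAdj]
  | cons b rest ih =>
    intro acc p
    rw [List.foldl_cons]
    by_cases h : some b ≠ p
    · have e : (if some b ≠ (acc, p).2 then ((acc, p).1 ++ [b], some b) else (acc, p))
          = (acc ++ [b], some b) := by simp [h]
      rw [e, ih]
      simp [pvDedupAdj, h]
    · have hp : some b = p := not_ne_iff.mp h
      have e : (if some b ≠ (acc, p).2 then ((acc, p).1 ++ [b], some b) else (acc, p))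
          = (acc, p) := by simp [hp]
      rw [e, ih]
      subst hp
      simp [pvDedupAdj]

theorem pvDedupAdj_key (l : List String) : ∀ (p : Option String),
    l.Pairwise (· ≤ ·) → (∀ x ∈ l, ∀ v, p = some v → v ≤ x) →
    (pvDedupAdj p l).Pairwise (· < ·) ∧ (∀ x, x ∈ pvDedupAdj p l ↔ x ∈ l ∧ some x ≠ p) := by
  induction l with
  | nil => intro p _ _; simp [pvDedupAdj]
  | cons b rest ih =>
    intro p hs hlb
    have hrest := (List.pairwise_cons.mp hs).2
    have hble := (List.pairwise_cons.mp hs).1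
    by_cases h : some b ≠ p
    · -- kept
      have ihr := ih (some b) hrest (by intro x hx v hv; cases hv; exact hble x hx)
      simp only [pvDedupAdj, if_pos h]
      constructor
      · rw [List.pairwise_cons]
        refine ⟨?_, ihr.1⟩
        intro x hx
        have := (ihr.2 x).mp hx
        exact lt_of_le_of_ne (hble x this.1) (by intro e; exact this.2 (by rw [e]))
      · intro x
        rw [List.mem_cons, ihr.2 x]
        constructor
        · rintro (rfl | ⟨hx, hne⟩)
          · exact ⟨List.mem_cons_self, h⟩
          · refine ⟨List.mem_cons_of_mem _ hx, ?_⟩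
            intro he
            rcases p with _ | v
            · exact absurd he (by simp)
            · have hv := hlb x (List.mem_cons_of_mem _ hx) v rfl
              have hvb := hlb b List.mem_cons_self v rfl
              have : x = v := by injection he
              have : b = v := le_antisymm (this ▸ hble x hx) hvb
              exact h (by rw [this])
        · rintro ⟨hx, hne⟩
          rcases List.mem_cons.mp hx with rfl | hx'
          · exact Or.inl rfl
          · by_cases he : x = b
            · exact Or.inl he
            · exact Or.inr ⟨hx', by simpa using he⟩
    · -- dropped: p = some b
      have hp : some b = p := not_ne_iff.mp h
      subst hp
      have ihr := ih (some b) hrest (by intro x hx v hv; injection hv with hv; exact hv ▸ hble x hx)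
      simp only [pvDedupAdj, ne_eq, not_true_eq_false, if_false]
      refine ⟨ihr.1, ?_⟩
      intro x
      rw [ihr.2 x, List.mem_cons]
      constructor
      · rintro ⟨hx, hne⟩; exact ⟨Or.inr hx, hne⟩
      · rintro ⟨rfl | hx, hne⟩
        · simp at hne
        · exact ⟨hx, hne⟩

theorem pvMain (custom_benefits llm_benefits : List String) : merge_benefits_py custom_benefits llm_benefits = merge_benefits_py_alt custom_benefits llm_benefits := by
  show (PySem.List.sorted (List.foldl (fun s benefit =>
      let b := pvTitle (PySem.Str.strip benefit)
      if s.any (fun existing => PySem.Str.lower existing == PySem.Str.lower b) then s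
      else PySem.Set.add s b)
      (List.foldl (fun s benefit => PySem.Set.add s (pvTitle (PySem.Str.strip benefit))) PySem.Set.empty custom_benefits) llm_benefits) (fun x => x)).take 10
    = ((PySem.List.sorted ((custom_benefits ++ llm_benefits).map (fun b => pvTitle (PySem.Str.strip b))) (fun x => x)).foldl
      (fun (acc : List String × Option String) b => if some b ≠ acc.2 then (acc.1 ++ [b], some b) else acc) ([], none)).1.take 10
  have hnormfold : ∀ (xs : List String) (s : PySem.Set String),
      xs.foldl (fun s benefit => PySem.Set.add s (pvTitle (PySem.Str.strip benefit))) s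
      = (xs.map pvNorm).foldl PySem.Set.add s := by
    intro xs s; rw [List.foldl_map]; rfl
  have hall1 : custom_benefits.foldl (fun s benefit => PySem.Set.add s (pvTitle (PySem.Str.strip benefit)))
      PySem.Set.empty = PySem.Set.ofList (custom_benefits.map pvNorm) := by
    rw [PySem.Set.ofList_eq_foldl, hnormfold]; rfl
  have hinv1 : ∀ x ∈ PySem.Set.ofList (custom_benefits.map pvNorm), ∃ a, x = pvNorm a := by
    intro x hx
    rw [PySem.Set.mem_ofList] at hx
    obtain ⟨a, _, rfl⟩ := List.mem_map.mp hx
    exact ⟨a, rfl⟩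
  have hall2 : (llm_benefits.foldl
      (fun s benefit =>
        let b := pvTitle (PySem.Str.strip benefit)
        if s.any (fun existing => PySem.Str.lower existing == PySem.Str.lower b) then s
        else PySem.Set.add s b) (PySem.Set.ofList (custom_benefits.map pvNorm)))
      = PySem.Set.ofList ((custom_benefits ++ llm_benefits).map pvNorm) := by
    have := pvLlmFold llm_benefits (PySem.Set.ofList (custom_benefits.map pvNorm)) hinv1
    simp only [pvNorm] at this
    rw [this]
    rw [List.map_append, PySem.Set.ofList_eq_foldl, PySem.Set.ofList_eq_foldl, List.foldl_append]
  rw [hall1, hall2]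
  have hbf := pvBFold (PySem.List.sorted ((custom_benefits ++ llm_benefits).map (fun b => pvTitle (PySem.Str.strip b))) (fun x => x)) [] none
  rw [hbf, List.nil_append]
  congr 1
  set norms := (custom_benefits ++ llm_benefits).map pvNorm with hn
  have hmapeq : (custom_benefits ++ llm_benefits).map (fun b => pvTitle (PySem.Str.strip b)) = norms := rfl
  rw [hmapeq]
  have hkey := pvDedupAdj_key (PySem.List.sorted norms (fun x => x)) none
    (by simpa using PySem.List.sorted_pairwise norms (fun x => x))
    (by intro x _ v hv; cases hv)
  have hnd : (pvDedupAdj none (PySem.List.sorted norms (fun x => x))).Nodup :=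
    hkey.1.imp (fun h => ne_of_lt h)
  apply PySem.List.sorted_eq_of_perm_of_pairwise_lt
  · rw [List.perm_ext_iff_of_nodup hnd (PySem.Set.nodup_ofList norms)]
    intro a
    rw [hkey.2 a, PySem.Set.mem_ofList, (PySem.List.sorted_perm norms (fun x => x) false).mem_iff]
    simp
  · exact hkey.1

-- ===== VERDICT =====
theorem merge_benefits_py_spec : Claim_equal_merge_benefits_py := by
  intro custom_benefits llm_benefits _
  unfold Spec_merge_benefits_py
  exact pvMain custom_benefits llm_benefits
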